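-- pv_equiv track=rewrite | github.com/teknoking-tech/kurulumGereksinimOneriSistemi | utils.py | calculate_total_hardware
-- ===== SOURCE A (Python) =====
-- def calculate_total_hardware(requirements, form_data):
--     """Toplam donanım gereksinimlerini hesaplayın"""
--     totals = {
--         "test": {"cpu": 0, "ram": 0, "disk": 0},
--         "live": {"cpu": 0, "ram": 0, "disk": 0}
--     }
--
--     # Her modül için gereksinimleri toplayın
--     for module_req in requirements["hardware"].values():
--         if "test" in form_data["environment_type"] and "test" in module_req:
--             # CPU çekirdekleri için sayısal değerleri çıkarın
--             cpu_cores = int(module_req["test"]["cpu"].split(' ')[0])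
--             totals["test"]["cpu"] += cpu_cores
--
--             # RAM (GB) için sayısal değerleri çıkarın
--             ram_gb = int(module_req["test"]["ram"].split(' ')[0])
--             totals["test"]["ram"] += ram_gb
--
--             # Disk alanı (GB) için sayısal değerleri çıkarın
--             disk_gb = int(module_req["test"]["disk"].split(' ')[0])
--             totals["test"]["disk"] += disk_gb
--
--         if "live" in form_data["environment_type"] and "live" in module_req:
--             # CPU çekirdekleri için sayısal değerleri çıkarın
--             cpu_cores = int(module_req["live"]["cpu"].split(' ')[0])
--             totals["live"]["cpu"] += cpu_cores
--
--             # RAM (GB) için sayısal değerleri çıkarın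
--             ram_gb = int(module_req["live"]["ram"].split(' ')[0])
--             totals["live"]["ram"] += ram_gb
--
--             # Disk alanı (GB) için sayısal değerleri çıkarın
--             disk_gb = int(module_req["live"]["disk"].split(' ')[0])
--             totals["live"]["disk"] += disk_gb
--
--     return totals
-- ===== SOURCE B (Python) =====
-- def calculate_total_hardware(requirements, form_data):
--     """Toplam donanim gereksinimlerini hesaplayin.
--
--     Map/divide-and-conquer decomposition: each module is mapped to a 6-vector
--     of its (test, live) x (cpu, ram, disk) contributions, and the vectors are
--     summed by balanced recursive pairwise addition.  Correct because integer
--     addition is associative and commutative, so the summation order does not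
--     change the totals.
--     """
--     modules = list(requirements["hardware"].values())
--     env_type = form_data.get("environment_type", "")
--
--     def contrib(m):
--         vals = []
--         for env in ("test", "live"):
--             if env in env_type and env in m:
--                 spec = m[env]
--                 vals += [int(spec[r].split(' ')[0]) for r in ("cpu", "ram", "disk")]
--             else:
--                 vals += [0, 0, 0]
--         return tuple(vals)
--
--     def dc(lo, hi):
--         if hi <= lo:
--             return (0, 0, 0, 0, 0, 0)
--         if hi - lo == 1:
--             return contrib(modules[lo])
--         mid = (lo + hi) // 2
--         left = dc(lo, mid)
--         right = dc(mid, hi)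
--         return tuple(x + y for x, y in zip(left, right))
--
--     tc, tr, td, lc, lr, ld = dc(0, len(modules))
--     return {"test": {"cpu": tc, "ram": tr, "disk": td},
--             "live": {"cpu": lc, "ram": lr, "disk": ld}}
-- ===== Notes on version B (the rewrite author's own statement) =====
-- stated objective: alternative
-- what changed: Replaces A's single left-to-right fold that mutates a nested totals dict through two unrolled env branches by a map/divide-and-conquer scheme: each module is mapped to an immutable 6-vector of contributions and the vectors are summed by balanced recursive pairwise addition (valid since integer addition is associative and commutative), the nested dict being assembled only at the end.
import Mathlib
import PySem

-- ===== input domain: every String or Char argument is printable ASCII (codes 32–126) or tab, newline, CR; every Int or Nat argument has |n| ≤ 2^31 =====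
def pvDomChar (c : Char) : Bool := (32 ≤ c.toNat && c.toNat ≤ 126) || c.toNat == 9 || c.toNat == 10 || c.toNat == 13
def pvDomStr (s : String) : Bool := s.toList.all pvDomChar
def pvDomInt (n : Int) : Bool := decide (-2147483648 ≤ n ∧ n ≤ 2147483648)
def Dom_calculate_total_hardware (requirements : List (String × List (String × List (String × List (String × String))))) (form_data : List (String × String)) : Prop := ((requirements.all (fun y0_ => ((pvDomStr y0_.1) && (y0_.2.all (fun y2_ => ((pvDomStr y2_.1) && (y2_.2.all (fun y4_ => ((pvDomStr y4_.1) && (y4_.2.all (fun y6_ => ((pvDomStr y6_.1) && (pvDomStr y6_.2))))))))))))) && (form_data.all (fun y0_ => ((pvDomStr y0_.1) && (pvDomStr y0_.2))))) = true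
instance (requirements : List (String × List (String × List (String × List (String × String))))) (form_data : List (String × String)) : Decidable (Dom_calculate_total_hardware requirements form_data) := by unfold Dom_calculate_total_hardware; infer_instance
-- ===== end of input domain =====

-- B replaces A's mutating left fold by mapping modules to immutable 6-vectors summed via balanced divide-and-conquer recursion; objective: alternative (same cost).


-- shared parsing helper: int(s.split(' ')[0]); the getD defaults never fire inside Pre_
def pvNum (s : String) : Int :=
  (PySem.Int.ofStr? (((PySem.Str.split? s " ").getD []).headD "")).getD 0

-- ===== PORT A =====
-- totals[env][res] += x
def pvAdd (t : PySem.Dict String (PySem.Dict String Int)) (env res : String) (x : Int) :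
    PySem.Dict String (PySem.Dict String Int) :=
  t.modify env (PySem.Dict.mk []) (fun inner => inner.modify res 0 (· + x))

-- the body of A's "for module_req in requirements['hardware'].values()" loop, branch for branch
def pvStepA (et : String) (t : PySem.Dict String (PySem.Dict String Int))
    (mr : List (String × List (String × String))) : PySem.Dict String (PySem.Dict String Int) :=
  let mrd := PySem.Dict.mk mr
  let t :=
    if PySem.Str.isIn "test" et && mrd.contains "test" then
      let inner := PySem.Dict.mk ((mrd.get? "test").getD [])
      let t := pvAdd t "test" "cpu"  (pvNum ((inner.get? "cpu").getD ""))
      let t := pvAdd t "test" "ram"  (pvNum ((inner.get? "ram").getD ""))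
      pvAdd t "test" "disk" (pvNum ((inner.get? "disk").getD ""))
    else t
  if PySem.Str.isIn "live" et && mrd.contains "live" then
    let inner := PySem.Dict.mk ((mrd.get? "live").getD [])
    let t := pvAdd t "live" "cpu"  (pvNum ((inner.get? "cpu").getD ""))
    let t := pvAdd t "live" "ram"  (pvNum ((inner.get? "ram").getD ""))
    pvAdd t "live" "disk" (pvNum ((inner.get? "disk").getD ""))
  else t

def calculate_total_hardware (requirements : List (String × List (String × List (String × List (String × String))))) (form_data : List (String × String)) : List (String × List (String × Int)) :=
  let totals0 : PySem.Dict String (PySem.Dict String Int) :=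
    PySem.Dict.mk [("test", PySem.Dict.mk [("cpu", 0), ("ram", 0), ("disk", 0)]),
                   ("live", PySem.Dict.mk [("cpu", 0), ("ram", 0), ("disk", 0)])]
  let mods := PySem.Dict.values (PySem.Dict.mk (((PySem.Dict.mk requirements).get? "hardware").getD []))
  let et := ((PySem.Dict.mk form_data).get? "environment_type").getD ""
  let totals := mods.foldl (pvStepA et) totals0
  totals.items.map (fun p => (p.1, p.2.items))

-- ===== PORT B =====
-- the 6-vector (test cpu, test ram, test disk, live cpu, live ram, live disk) of one module
def pvContrib (et : String) (m : List (String × List (String × String))) :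
    Int × Int × Int × Int × Int × Int :=
  let md := PySem.Dict.mk m
  let t : Int × Int × Int :=
    if PySem.Str.isIn "test" et && md.contains "test" then
      let spec := PySem.Dict.mk ((md.get? "test").getD [])
      (pvNum ((spec.get? "cpu").getD ""), pvNum ((spec.get? "ram").getD ""),
       pvNum ((spec.get? "disk").getD ""))
    else (0, 0, 0)
  let l : Int × Int × Int :=
    if PySem.Str.isIn "live" et && md.contains "live" then
      let spec := PySem.Dict.mk ((md.get? "live").getD [])
      (pvNum ((spec.get? "cpu").getD ""), pvNum ((spec.get? "ram").getD ""),
       pvNum ((spec.get? "disk").getD ""))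
    else (0, 0, 0)
  (t.1, t.2.1, t.2.2, l.1, l.2.1, l.2.2)

-- tuple(x + y for x, y in zip(left, right))
def pvVAdd (x y : Int × Int × Int × Int × Int × Int) : Int × Int × Int × Int × Int × Int :=
  (x.1 + y.1, x.2.1 + y.2.1, x.2.2.1 + y.2.2.1, x.2.2.2.1 + y.2.2.2.1,
   x.2.2.2.2.1 + y.2.2.2.2.1, x.2.2.2.2.2 + y.2.2.2.2.2)

-- Source B's dc(lo, hi); modules[lo] is always in range here, so the .getD default never fires
def pvDC (et : String) (modules : List (List (String × List (String × String))))
    (lo hi : Nat) : Int × Int × Int × Int × Int × Int :=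
  if hi ≤ lo then (0, 0, 0, 0, 0, 0)
  else if hi - lo = 1 then pvContrib et ((PySem.List.pyGet? modules (lo : Int)).getD [])
  else
    let mid := (lo + hi) / 2
    pvVAdd (pvDC et modules lo mid) (pvDC et modules mid hi)
termination_by hi - lo
decreasing_by all_goals omega

def calculate_total_hardware_alt (requirements : List (String × List (String × List (String × List (String × String))))) (form_data : List (String × String)) : List (String × List (String × Int)) :=
  let modules := PySem.Dict.values (PySem.Dict.mk (((PySem.Dict.mk requirements).get? "hardware").getD []))
  let env_type := (PySem.Dict.mk form_data).getD "environment_type" ""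
  let v := pvDC env_type modules 0 modules.length
  [("test", [("cpu", v.1), ("ram", v.2.1), ("disk", v.2.2.1)]),
   ("live", [("cpu", v.2.2.2.1), ("ram", v.2.2.2.2.1), ("disk", v.2.2.2.2.2)])]

-- ===== PRECONDITION & SPEC =====
-- one module passes iff every selected (env, res) cell exists and its first space-separated field parses as int
def pvModOk (et : String) (m : List (String × List (String × String))) : Bool :=
  ["test", "live"].all (fun env =>
    let md := PySem.Dict.mk m
    !(PySem.Str.isIn env et && md.contains env) ||
      (let inner := PySem.Dict.mk ((md.get? env).getD [])
       ["cpu", "ram", "disk"].all (fun res =>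
         match inner.get? res with
         | some v => (PySem.Int.ofStr? (((PySem.Str.split? v " ").getD []).headD "")).isSome
         | none => false)))

-- Pre_ = exactly the inputs where A returns: "hardware" key exists; if it has any module, "environment_type"
-- exists and every selected cell of every module is present and int-parseable.
def Pre_calculate_total_hardware (requirements : List (String × List (String × List (String × List (String × String))))) (form_data : List (String × String)) : Prop :=
  (PySem.Dict.mk requirements).contains "hardware" = true ∧
  (let mods := PySem.Dict.values (PySem.Dict.mk (((PySem.Dict.mk requirements).get? "hardware").getD []))
   mods = [] ∨
     ((PySem.Dict.mk form_data).contains "environment_type" = true ∧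
      ∀ m ∈ mods, pvModOk (((PySem.Dict.mk form_data).get? "environment_type").getD "") m = true))
instance (requirements : List (String × List (String × List (String × List (String × String))))) (form_data : List (String × String)) : Decidable (Pre_calculate_total_hardware requirements form_data) := by unfold Pre_calculate_total_hardware; infer_instance

def pvWitness_calculate_total_hardware : (List (String × List (String × List (String × List (String × String))))) × (List (String × String)) :=
  ([("hardware", [("m1", [("test", [("cpu", "2 cores"), ("ram", "4 GB"), ("disk", "50 GB")])])])],
   [("environment_type", "test")])

def Spec_calculate_total_hardware (requirements : List (String × List (String × List (String × List (String × String))))) (form_data : List (String × String)) (out : List (String × List (String × Int))) : Prop := out = calculate_total_hardware_alt requirements form_data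
instance (requirements : List (String × List (String × List (String × List (String × String))))) (form_data : List (String × String)) (out : List (String × List (String × Int))) : Decidable (Spec_calculate_total_hardware requirements form_data out) := by unfold Spec_calculate_total_hardware; infer_instance

-- ===== CLAIM (what is proved, stated in full; the proofs are below) =====
def Claim_equal_calculate_total_hardware : Prop := ∀ (requirements : List (String × List (String × List (String × List (String × String))))) (form_data : List (String × String)), Dom_calculate_total_hardware requirements form_data → Pre_calculate_total_hardware requirements form_data → Spec_calculate_total_hardware requirements form_data (calculate_total_hardware requirements form_data)

-- ===== LEMMAS AND PROOFS =====
-- the literal shape of A's totals dict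
def mkT (a b c d e f : Int) : PySem.Dict String (PySem.Dict String Int) :=
  PySem.Dict.mk [("test", PySem.Dict.mk [("cpu", a), ("ram", b), ("disk", c)]),
                 ("live", PySem.Dict.mk [("cpu", d), ("ram", e), ("disk", f)])]

theorem pvAdd_t_cpu (a b c d e f x : Int) : pvAdd (mkT a b c d e f) "test" "cpu" x = mkT (a+x) b c d e f := by
  simp [pvAdd, mkT, PySem.Dict.modify, PySem.Dict.insert, PySem.Dict.getD, PySem.Dict.get?, PySem.Dict.contains]
theorem pvAdd_t_ram (a b c d e f x : Int) : pvAdd (mkT a b c d e f) "test" "ram" x = mkT a (b+x) c d e f := by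
  simp [pvAdd, mkT, PySem.Dict.modify, PySem.Dict.insert, PySem.Dict.getD, PySem.Dict.get?, PySem.Dict.contains]
theorem pvAdd_t_disk (a b c d e f x : Int) : pvAdd (mkT a b c d e f) "test" "disk" x = mkT a b (c+x) d e f := by
  simp [pvAdd, mkT, PySem.Dict.modify, PySem.Dict.insert, PySem.Dict.getD, PySem.Dict.get?, PySem.Dict.contains]
theorem pvAdd_l_cpu (a b c d e f x : Int) : pvAdd (mkT a b c d e f) "live" "cpu" x = mkT a b c (d+x) e f := by
  simp [pvAdd, mkT, PySem.Dict.modify, PySem.Dict.insert, PySem.Dict.getD, PySem.Dict.get?, PySem.Dict.contains]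
theorem pvAdd_l_ram (a b c d e f x : Int) : pvAdd (mkT a b c d e f) "live" "ram" x = mkT a b c d (e+x) f := by
  simp [pvAdd, mkT, PySem.Dict.modify, PySem.Dict.insert, PySem.Dict.getD, PySem.Dict.get?, PySem.Dict.contains]
theorem pvAdd_l_disk (a b c d e f x : Int) : pvAdd (mkT a b c d e f) "live" "disk" x = mkT a b c d e (f+x) := by
  simp [pvAdd, mkT, PySem.Dict.modify, PySem.Dict.insert, PySem.Dict.getD, PySem.Dict.get?, PySem.Dict.contains]

-- one step of A's loop, expressed through the module's contribution vector
theorem pvStepA_eval (et : String) (m : List (String × List (String × String))) (a b c d e f : Int) :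
    pvStepA et (mkT a b c d e f) m =
    mkT (a + (pvContrib et m).1) (b + (pvContrib et m).2.1) (c + (pvContrib et m).2.2.1)
        (d + (pvContrib et m).2.2.2.1) (e + (pvContrib et m).2.2.2.2.1) (f + (pvContrib et m).2.2.2.2.2) := by
  unfold pvStepA pvContrib
  dsimp only
  split_ifs <;>
    simp [pvAdd_t_cpu, pvAdd_t_ram, pvAdd_t_disk, pvAdd_l_cpu, pvAdd_l_ram, pvAdd_l_disk]

-- linear vector sum of the contributions (the common value of both programs)
def pvVS (et : String) (ms : List (List (String × List (String × String)))) :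
    Int × Int × Int × Int × Int × Int :=
  ms.foldr (fun m acc => pvVAdd (pvContrib et m) acc) (0, 0, 0, 0, 0, 0)

theorem pvVS_append (et : String) (l₁ l₂ : List (List (String × List (String × String)))) :
    pvVS et (l₁ ++ l₂) = pvVAdd (pvVS et l₁) (pvVS et l₂) := by
  induction l₁ with
  | nil => simp [pvVS, pvVAdd]
  | cons m t ih => simp_all [pvVS, pvVAdd]; omega

theorem pvVS_single (et : String) (m : List (String × List (String × String))) :
    pvVS et [m] = pvContrib et m := by
  simp [pvVS, pvVAdd]

-- A's fold computes the linear vector sum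
theorem pvLoopA (et : String) (ms : List (List (String × List (String × String)))) :
    ∀ a b c d e f : Int,
    ms.foldl (pvStepA et) (mkT a b c d e f)
    = mkT (a + (pvVS et ms).1) (b + (pvVS et ms).2.1) (c + (pvVS et ms).2.2.1)
          (d + (pvVS et ms).2.2.2.1) (e + (pvVS et ms).2.2.2.2.1) (f + (pvVS et ms).2.2.2.2.2) := by
  induction ms with
  | nil => intro a b c d e f; simp [pvVS]
  | cons m t ih =>
    intro a b c d e f
    rw [List.foldl_cons, pvStepA_eval, ih]
    simp only [pvVS, List.foldr_cons, pvVAdd, mkT, PySem.Dict.mk.injEq, List.cons.injEq,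
      Prod.mk.injEq, and_true, true_and]
    omega

-- B's divide-and-conquer computes the linear vector sum of the slice
theorem pvDC_eq (et : String) (ms : List (List (String × List (String × String)))) :
    ∀ n lo hi, hi - lo ≤ n → hi ≤ ms.length →
    pvDC et ms lo hi = pvVS et ((ms.drop lo).take (hi - lo)) := by
  intro n
  induction n with
  | zero =>
    intro lo hi h _
    rw [pvDC]
    have : hi ≤ lo := by omega
    simp [this, show hi - lo = 0 by omega, pvVS]
  | succ n ih =>
    intro lo hi h hlen
    rw [pvDC]
    split_ifs with h0 h1
    · simp [show hi - lo = 0 by omega, pvVS]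
    · have hlt : lo < ms.length := by omega
      have : (ms.drop lo).take (hi - lo) = [ms[lo]] := by
        rw [h1]
        rw [List.take_one, List.head?_drop]
        simp [hlt]
      rw [this, pvVS_single]
      congr 1
      simp [hlt]
    · have h2 : lo + 2 ≤ hi := by omega
      have hm1 : (lo + hi) / 2 - lo ≤ n := by omega
      have hm2 : hi - (lo + hi) / 2 ≤ n := by omega
      have hml : (lo + hi) / 2 ≤ ms.length := by omega
      dsimp only
      rw [ih lo ((lo + hi) / 2) hm1 hml, ih ((lo + hi) / 2) hi hm2 hlen]
      have hdd : List.drop ((lo + hi) / 2 - lo) (List.drop lo ms) = List.drop ((lo + hi) / 2) ms := by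
        rw [List.drop_drop, Nat.add_sub_cancel' (by omega : lo ≤ (lo + hi) / 2)]
      rw [show hi - lo = ((lo + hi) / 2 - lo) + (hi - (lo + hi) / 2) by omega, List.take_add,
        hdd, ← pvVS_append]

-- ===== VERDICT (by name: the statement is the Claim_ definition above) =====
theorem calculate_total_hardware_spec : Claim_equal_calculate_total_hardware := by
  intro req fd _hdom _hpre
  unfold Spec_calculate_total_hardware calculate_total_hardware calculate_total_hardware_alt
  rw [show ((PySem.Dict.mk fd).getD "environment_type" "") = (((PySem.Dict.mk fd).get? "environment_type").getD "") from PySem.Dict.getD_eq_get?_getD _ _ _]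
  dsimp only
  rw [show (PySem.Dict.mk [("test", PySem.Dict.mk [("cpu", (0:Int)), ("ram", 0), ("disk", 0)]),
       ("live", PySem.Dict.mk [("cpu", 0), ("ram", 0), ("disk", 0)])]) = mkT 0 0 0 0 0 0 from rfl]
  rw [pvLoopA]
  rw [pvDC_eq _ _ _ 0 _ (le_refl _) (le_refl _)]
  have htake : List.take ((((PySem.Dict.mk req).get? "hardware").getD []).length)
      (List.map (fun (x : String × List (String × List (String × String))) => x.2)
        (((PySem.Dict.mk req).get? "hardware").getD []))
      = List.map (fun x => x.2) (((PySem.Dict.mk req).get? "hardware").getD []) := by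
    conv_lhs => rw [← List.length_map (f := fun (x : String × List (String × List (String × String))) => x.2)]
    exact List.take_length
  simp [mkT, PySem.Dict.values, htake]
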